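-- pv_equiv track=rewrite | github.com/Sumit8392/Excellence-Technologies-Tests | Excellence Technologies Test.py | Maximum_Consecutive
-- ===== SOURCE A (Python) =====
-- def Maximum_Consecutive(arr,n):
--     count=0
--     result=0
--     for i in range(0,n):
--         if(arr[i]==0):
--             count=0
--         else:
--             count+=1
--             result=max(result,count)
--     return result
-- ===== SOURCE B (Python) =====
-- def Maximum_Consecutive(arr, n):
--     xs = arr[:max(n, 0)]
--     zeros = [i for i, x in enumerate(xs) if x == 0]
--     bounds = [-1] + zeros + [len(xs)]
--     best = 0
--     for a, b in zip(bounds, bounds[1:]):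
--         best = max(best, b - a - 1)
--     return best
-- ===== Notes on version B (the rewrite author's own statement) =====
-- stated objective: alternative
-- what changed: Instead of A's single pass maintaining a running count and running maximum, B slices the first n elements, collects the positions of the zeros, brackets them with sentinels -1 and len, and takes the maximum gap between consecutive zero positions.
import Mathlib
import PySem

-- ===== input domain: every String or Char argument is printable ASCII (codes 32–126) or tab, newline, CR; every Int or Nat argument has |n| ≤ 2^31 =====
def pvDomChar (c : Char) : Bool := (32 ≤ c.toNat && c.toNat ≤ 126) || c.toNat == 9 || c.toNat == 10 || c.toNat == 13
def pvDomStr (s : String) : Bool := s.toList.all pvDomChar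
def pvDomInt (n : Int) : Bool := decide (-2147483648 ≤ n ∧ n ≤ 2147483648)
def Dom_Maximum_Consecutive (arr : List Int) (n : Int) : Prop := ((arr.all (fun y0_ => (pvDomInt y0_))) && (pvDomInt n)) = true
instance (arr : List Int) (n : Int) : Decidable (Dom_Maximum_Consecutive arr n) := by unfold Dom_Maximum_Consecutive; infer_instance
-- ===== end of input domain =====

-- B computes the answer from the positions of the zeros (max gap between consecutive
-- zero positions with sentinels) instead of A's running count/maximum pass; equal cost.

-- ===== PORT A =====
-- A's loop 'for i in range(0,n)' with state (count, result); arr[i] is in range under Pre_.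
def Maximum_Consecutive (arr : List Int) (n : Int) : Int :=
  ((PySem.List.pyRange 0 n 1).foldl
    (fun (s : Int × Int) (i : Int) =>
      if PySem.List.pyGetD arr i 0 = 0 then (0, s.2)
      else (s.1 + 1, max s.2 (s.1 + 1)))
    (0, 0)).2

-- ===== PORT B =====
def Maximum_Consecutive_alt (arr : List Int) (n : Int) : Int :=
  let xs := PySem.List.slice arr none (some (max n 0))
  let zeros := (PySem.List.enumerate xs 0).filterMap
    (fun p => if p.2 = 0 then some p.1 else none)
  let bounds := -1 :: zeros ++ [(xs.length : Int)]
  (bounds.zip bounds.tail).foldl (fun best q => max best (q.2 - q.1 - 1)) 0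

-- ===== PRECONDITION & SPEC =====
-- Pre_ excludes exactly n > len(arr), where A raises IndexError.
def Pre_Maximum_Consecutive (arr : List Int) (n : Int) : Prop :=
  n ≤ (arr.length : Int)
instance (arr : List Int) (n : Int) : Decidable (Pre_Maximum_Consecutive arr n) := by
  unfold Pre_Maximum_Consecutive; infer_instance

def pvWitness_Maximum_Consecutive : List Int × Int := ([1, 0, 1, 1], 4)

def Spec_Maximum_Consecutive (arr : List Int) (n : Int) (out : Int) : Prop :=
  out = Maximum_Consecutive_alt arr n
instance (arr : List Int) (n : Int) (out : Int) : Decidable (Spec_Maximum_Consecutive arr n out) := by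
  unfold Spec_Maximum_Consecutive; infer_instance

-- ===== CLAIM (what is proved, stated in full; the proofs are below) =====
def Claim_equal_Maximum_Consecutive : Prop := ∀ (arr : List Int) (n : Int), Dom_Maximum_Consecutive arr n → Pre_Maximum_Consecutive arr n → Spec_Maximum_Consecutive arr n (Maximum_Consecutive arr n)

-- ===== LEMMAS AND PROOFS =====

-- A's loop step, and the "best run starting with credit c" recursion it computes.
def pvStep (s : Int × Int) (x : Int) : Int × Int :=
  if x = 0 then (0, s.2) else (s.1 + 1, max s.2 (s.1 + 1))

def pvBest (c : Int) : List Int → Int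
  | [] => c
  | x :: t => if x = 0 then max c (pvBest 0 t) else pvBest (c + 1) t

theorem le_pvBest (t : List Int) : ∀ c : Int, c ≤ pvBest c t := by
  induction t with
  | nil => intro c; simp [pvBest]
  | cons x t ih =>
    intro c
    by_cases hx : x = 0
    · simp [pvBest, hx]
    · simpa [pvBest, hx] using le_trans (by omega : c ≤ c + 1) (ih (c + 1))

theorem foldA_eq (t : List Int) : ∀ c r : Int, 0 ≤ c → c ≤ r →
    (t.foldl pvStep (c, r)).2 = max r (pvBest c t) := by
  induction t with
  | nil => intro c r _ h; simp [pvBest]; omega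
  | cons x t ih =>
    intro c r hc hcr
    by_cases hx : x = 0
    · have := ih 0 r le_rfl (le_trans hc hcr)
      simp [pvStep, hx, pvBest, this]
      omega
    · have := ih (c + 1) (max r (c + 1)) (by omega) (by omega)
      have hb := le_pvBest t (c + 1)
      simp [pvStep, hx, pvBest, this]
      omega

-- zeros positions of a list, starting index s
def pvZ (s : Int) : List Int → List Int
  | [] => []
  | x :: t => (if x = 0 then [s] else []) ++ pvZ (s + 1) t

theorem pvZ_filterMap (t : List Int) : ∀ s : Int,
    (PySem.List.enumerate t s).filterMap (fun p => if p.2 = 0 then some p.1 else none)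
      = pvZ s t := by
  induction t with
  | nil => intro s; simp [pvZ, PySem.List.enumerate_nil]
  | cons x t ih =>
    intro s
    by_cases hx : x = 0 <;>
      simp [PySem.List.enumerate_cons, hx, pvZ, ih]

theorem pvZ_shift (t : List Int) : ∀ s : Int, pvZ (s + 1) t = (pvZ s t).map (· + 1) := by
  induction t with
  | nil => intro s; simp [pvZ]
  | cons x t ih =>
    intro s
    by_cases hx : x = 0 <;> simp [pvZ, hx, ih (s + 1)]

-- gaps between consecutive entries
def pvGaps : List Int → List Int
  | [] => []
  | [_] => []
  | a :: b :: t => (b - a - 1) :: pvGaps (b :: t)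

theorem pvGaps_cons_cons (a b : Int) (t : List Int) :
    pvGaps (a :: b :: t) = (b - a - 1) :: pvGaps (b :: t) := rfl

theorem pvGaps_map_add_one : ∀ l : List Int, pvGaps (l.map (· + 1)) = pvGaps l := by
  intro l
  induction l with
  | nil => rfl
  | cons a t ih =>
    cases t with
    | nil => rfl
    | cons b t =>
      simp only [List.map_cons] at ih ⊢
      rw [pvGaps_cons_cons, pvGaps_cons_cons, ih]
      congr 1
      ring

theorem foldl_max_max (l : List Int) : ∀ a b : Int, l.foldl max (max a b) = max a (l.foldl max b) := by
  induction l with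
  | nil => intro a b; rfl
  | cons x t ih =>
    intro a b
    simp only [List.foldl_cons]
    rw [max_assoc, ih]

-- the sentinel chain of B
def pvChain (c : Int) (t : List Int) : List Int :=
  (-1 - c) :: pvZ 0 t ++ [(t.length : Int)]

theorem pvZ_one (t : List Int) : pvZ 1 t = (pvZ 0 t).map (· + 1) := by
  have h := pvZ_shift t 0
  norm_num at h
  exact h

-- main B-side characterisation: the max gap in the sentinel chain is pvBest
theorem chain_eq (t : List Int) : ∀ c : Int, 0 ≤ c →
    (pvGaps (pvChain c t)).foldl max 0 = pvBest c t := by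
  induction t with
  | nil => intro c hc; simp [pvChain, pvZ, pvGaps, pvBest]; omega
  | cons x t ih =>
    intro c hc
    by_cases hx : x = 0
    · have e1 : pvChain c (x :: t)
          = (-1 - c) :: 0 :: ((pvZ 0 t).map (· + 1) ++ [((t.length : Int) + 1)]) := by
        simp [pvChain, pvZ, hx, pvZ_one]
      have e2 : ((0 : Int) :: ((pvZ 0 t).map (· + 1) ++ [((t.length : Int) + 1)]))
          = (pvChain 0 t).map (· + 1) := by
        simp [pvChain]
      rw [e1, pvGaps_cons_cons, e2, pvGaps_map_add_one, List.foldl_cons]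
      rw [show max (0 : Int) (0 - (-1 - c) - 1) = max c 0 by omega]
      rw [foldl_max_max, ih 0 le_rfl]
      simp [pvBest, hx]
    · have e1 : pvChain c (x :: t) = (pvChain (c + 1) t).map (· + 1) := by
        simp [pvChain, pvZ, hx, pvZ_one]
        omega
      rw [e1, pvGaps_map_add_one, ih (c + 1) (by omega)]
      simp [pvBest, hx]

theorem zip_tail_foldl (l : List Int) : ∀ init : Int,
    (l.zip l.tail).foldl (fun best q => max best (q.2 - q.1 - 1)) init
      = (pvGaps l).foldl max init := by
  induction l with
  | nil => intro init; rfl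
  | cons a t ih =>
    intro init
    cases t with
    | nil => rfl
    | cons b t =>
      simp only [List.tail_cons, List.zip_cons_cons, List.foldl_cons, pvGaps]
      exact ih _

-- ===== VERDICT (by name: the statement is the Claim_ definition above) =====
theorem Maximum_Consecutive_spec : Claim_equal_Maximum_Consecutive := by
  intro arr n _ hpre
  set m : Int := max n 0 with hm
  have hn0 : 0 ≤ m := le_max_right n 0
  have hnle : n ≤ (arr.length : Int) := hpre
  have hnl : m ≤ (arr.length : Int) := by
    have : (0 : Int) ≤ (arr.length : Int) := by positivity
    omega
  have hrange : PySem.List.pyRange 0 n 1 = PySem.List.pyRange 0 m 1 := by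
    rcases le_total 0 n with h | h
    · rw [hm, max_eq_left h]
    · rw [PySem.List.pyRange_one_eq_nil h,
          PySem.List.pyRange_one_eq_nil (by omega)]
  set xs : List Int := arr.take m.toNat with hxs
  have hslice : PySem.List.slice arr none (some m) = xs := PySem.List.slice_to arr hn0
  have hlen : (xs.length : Int) = m := by
    simp [hxs]; omega
  have hA : Maximum_Consecutive arr n = (xs.foldl pvStep (0, 0)).2 := by
    show ((PySem.List.pyRange 0 n 1).foldl
      (fun (s : Int × Int) (i : Int) => pvStep s (PySem.List.pyGetD arr i 0)) (0, 0)).2 = _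
    rw [hrange]
    have hcong : (PySem.List.pyRange 0 m 1).foldl
        (fun (s : Int × Int) (i : Int) => pvStep s (PySem.List.pyGetD arr i 0)) (0, 0)
        = (PySem.List.pyRange 0 m 1).foldl
        (fun (s : Int × Int) (i : Int) => pvStep s (PySem.List.pyGetD xs i 0)) (0, 0) := by
      apply PySem.List.foldl_congr_mem
      intro s i hi
      obtain ⟨h0, hltn⟩ := (PySem.List.mem_pyRange_one).1 hi
      have hget : PySem.List.pyGetD arr i 0 = PySem.List.pyGetD xs i 0 := by
        have hlt1 : i < (arr.length : Int) := by omega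
        have hlt2 : i < (xs.length : Int) := by omega
        rw [PySem.List.pyGetD_eq_getElem arr 0 h0 hlt1,
            PySem.List.pyGetD_eq_getElem xs 0 h0 hlt2]
        simp [hxs]
      rw [hget]
    rw [hcong, ← hlen]
    exact congrArg Prod.snd
      (PySem.List.foldl_pyRange_zero_pyGetD' xs 0 pvStep ((0, 0) : Int × Int))
  have hB : Maximum_Consecutive_alt arr n = (pvGaps (pvChain 0 xs)).foldl max 0 := by
    simp only [Maximum_Consecutive_alt]
    rw [← hm, hslice, pvZ_filterMap, zip_tail_foldl]
    norm_num [pvChain]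
  unfold Spec_Maximum_Consecutive
  rw [hA, hB, chain_eq xs 0 le_rfl, foldA_eq xs 0 0 le_rfl le_rfl]
  have := le_pvBest xs 0
  omega
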